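-- pv_equiv track=rewrite | github.com/TheBlazedDude/RIAI_2 | app/backend/core/runtime/chat.py | _choose_offset
-- ===== SOURCE A (Python) =====
-- from typing import Any, Dict, List, Tuple
--
-- def _choose_offset(offsets: List[int]) -> int | None:
--     nums = []
--     for x in offsets:
--         try:
--             nums.append(int(x))
--         except Exception:
--             continue
--     if not nums:
--         return None
--     return sorted(nums)[0]
-- ===== SOURCE B (Python) =====
-- def _choose_offset(offsets):
--     best = None
--     for x in offsets:
--         try:
--             v = int(x)
--         except Exception:
--             continue
--         if best is None or v < best:
--             best = v
--     return best
-- ===== Notes on version B (the rewrite author's own statement) =====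
-- stated objective: faster
-- what changed: Replaces building an intermediate list, sorting it and taking element 0 with a single streaming pass that keeps one running-minimum accumulator (no list, no sort).
import Mathlib
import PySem

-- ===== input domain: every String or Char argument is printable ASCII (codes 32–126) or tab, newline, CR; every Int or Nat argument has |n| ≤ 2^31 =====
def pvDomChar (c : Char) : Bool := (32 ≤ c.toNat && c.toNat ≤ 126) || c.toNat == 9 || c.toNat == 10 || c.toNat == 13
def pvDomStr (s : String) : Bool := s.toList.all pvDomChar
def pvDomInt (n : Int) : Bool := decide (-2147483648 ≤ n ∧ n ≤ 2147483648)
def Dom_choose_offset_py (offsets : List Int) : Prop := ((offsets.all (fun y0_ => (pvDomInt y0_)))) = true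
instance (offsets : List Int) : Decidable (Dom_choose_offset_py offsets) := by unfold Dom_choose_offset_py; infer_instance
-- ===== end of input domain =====

-- B replaces build-list-then-sort-and-index with one streaming running-minimum pass (objective: simpler).

-- ===== PORT A =====
-- int(x) on an int x is x itself and never raises, so the try/except append always appends x.
def choose_offset_py (offsets : List Int) : Option Int :=
  let nums : List Int := offsets.foldl (fun acc x => acc ++ [x]) []
  if nums = [] then none
  else PySem.List.pyGet? (PySem.List.sorted nums (fun y => y) false) 0

-- ===== PORT B =====
def choose_offset_py_alt (offsets : List Int) : Option Int :=
  offsets.foldl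
    (fun best x =>
      match best with
      | none => some x
      | some b => if x < b then some x else some b)
    none

-- ===== PRECONDITION & SPEC =====
def Spec_choose_offset_py (offsets : List Int) (out : Option Int) : Prop := out = choose_offset_py_alt offsets
instance (offsets : List Int) (out : Option Int) : Decidable (Spec_choose_offset_py offsets out) := by unfold Spec_choose_offset_py; infer_instance

-- ===== CLAIM (what is proved, stated in full; the proofs are below) =====
def Claim_equal_choose_offset_py : Prop := ∀ (offsets : List Int), Dom_choose_offset_py offsets → Spec_choose_offset_py offsets (choose_offset_py offsets)

-- ===== LEMMAS AND PROOFS =====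

theorem pv_foldl_append_id (acc : List Int) (l : List Int) :
    l.foldl (fun a x => a ++ [x]) acc = acc ++ l := by
  induction l generalizing acc with
  | nil => simp
  | cons x t ih => simp [List.foldl, ih]

theorem pv_alt_fold_min (t : List Int) (b : Int) :
    t.foldl
      (fun best x =>
        match best with
        | none => some x
        | some b => if x < b then some x else some b)
      (some b) = some (t.foldl min b) := by
  induction t generalizing b with
  | nil => rfl
  | cons y t ih =>
    simp only [List.foldl]
    by_cases h : y < b
    · rw [if_pos h, ih]
      simp [min_eq_right (le_of_lt h)]
    · rw [if_neg h, ih]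
      simp [min_eq_left (le_of_not_gt h)]

theorem choose_offset_py_eq (offsets : List Int) :
    choose_offset_py offsets = choose_offset_py_alt offsets := by
  unfold choose_offset_py choose_offset_py_alt
  rw [pv_foldl_append_id]
  simp only [List.nil_append]
  cases offsets with
  | nil => rfl
  | cons x t =>
    rw [if_neg (List.cons_ne_nil x t)]
    simp only [List.foldl]
    rw [pv_alt_fold_min]
    -- head of sorted (x :: t) is the minimum t.foldl min x
    have hperm := PySem.List.sorted_perm (x :: t) (fun y => y) false
    have hne : PySem.List.sorted (x :: t) (fun y => y) false ≠ [] := by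
      intro h
      have := hperm.length_eq
      simp [h] at this
    obtain ⟨m, s, hms⟩ := List.exists_cons_of_ne_nil hne
    rw [hms, PySem.List.pyGet?_zero_cons]
    congr 1
    have hmmem : m ∈ (x :: t : List Int) := by
      have : m ∈ PySem.List.sorted (x :: t) (fun y => y) false := by simp [hms]
      exact (PySem.List.mem_sorted (x :: t) (fun y => y) false m).1 this
    have hmle : ∀ y ∈ (x :: t : List Int), m ≤ y :=
      PySem.List.key_head_sorted_le (x :: t) (fun y => y) hms
    have hmin : PySem.List.min? (x :: t) (fun y => y) = some (t.foldl min x) :=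
      PySem.List.min?_id_cons x t
    have hfmem : t.foldl min x ∈ (x :: t : List Int) := PySem.List.min?_mem hmin
    have hfle : ∀ y ∈ (x :: t : List Int), t.foldl min x ≤ y :=
      PySem.List.min?_isMin hmin
    exact le_antisymm (hmle _ hfmem) (hfle _ hmmem)

-- ===== VERDICT (by name: the statement is the Claim_ definition above) =====
theorem choose_offset_py_spec : Claim_equal_choose_offset_py := by
  intro offsets _
  unfold Spec_choose_offset_py
  exact choose_offset_py_eq offsets
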